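-- pv_equiv track=rewrite | github.com/skush2024/Data-Structures | Recursion/recursion.py | make_words
-- ===== SOURCE A (Python) =====
-- def make_words(choices):
--     result = []
--
--     def explore(path):
--         if len(path) == len(choices):
--             result.append(path.copy())
--             return
--
--         for choice in choices:
--             if choice in path :
--                 continue
--             path.append(choice)
--             explore(path)
--             path.pop()
--
--     explore([])
--     return result
-- ===== SOURCE B (Python) =====
-- def make_words(choices):
--     # Iterative BFS frontier instead of recursion: extend each partial by one
--     # unused choice per round, len(choices) rounds in total.
--     partials = [[]]
--     for _ in range(len(choices)):
--         partials = [p + [c] for p in partials for c in choices if c not in p]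
--     return partials
-- ===== Notes on version B (the rewrite author's own statement) =====
-- stated objective: alternative
-- what changed: Replaces the recursive backtracking DFS (append/explore/pop on a shared path) with an iterative breadth-first frontier that rebuilds the list of partial permutations once per round with a comprehension.
import Mathlib
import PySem

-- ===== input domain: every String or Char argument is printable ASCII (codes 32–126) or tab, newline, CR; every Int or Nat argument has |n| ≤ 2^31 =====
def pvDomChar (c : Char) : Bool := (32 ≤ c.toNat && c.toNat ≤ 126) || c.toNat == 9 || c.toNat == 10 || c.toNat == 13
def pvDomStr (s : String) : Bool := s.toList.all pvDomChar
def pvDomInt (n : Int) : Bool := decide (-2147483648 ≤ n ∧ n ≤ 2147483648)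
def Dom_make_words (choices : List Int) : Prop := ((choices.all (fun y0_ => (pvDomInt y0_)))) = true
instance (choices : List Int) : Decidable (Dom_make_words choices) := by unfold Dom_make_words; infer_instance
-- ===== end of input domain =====

-- B replaces A's recursive backtracking DFS with an iterative breadth-first frontier
-- of partial permutations; same output, same order (alternative decomposition).

-- ===== PORT A =====
-- A's recursive `explore`; `fuel` only makes the recursion structural (fuel = slots
-- still to fill; it never runs out on the actual calls, started with choices.length).
def exploreA (choices : List Int) (fuel : Nat) (path : List Int) : List (List Int) :=
  if path.length = choices.length then [path]
  else
    match fuel with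
    | 0 => []
    | n + 1 =>
      choices.foldl
        (fun acc c => if c ∈ path then acc else acc ++ exploreA choices n (path ++ [c]))
        []

def make_words (choices : List Int) : List (List Int) :=
  exploreA choices choices.length []

-- ===== PORT B =====
-- one round of B's comprehension: extend every partial by each unused choice
def stepB (choices : List Int) (partials : List (List Int)) : List (List Int) :=
  partials.flatMap (fun p => (choices.filter (fun c => ¬ c ∈ p)).map (fun c => p ++ [c]))

def make_words_alt (choices : List Int) : List (List Int) :=
  (List.range choices.length).foldl (fun partials _ => stepB choices partials) [[]]

-- ===== PRECONDITION & SPEC =====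
def Spec_make_words (choices : List Int) (out : List (List Int)) : Prop := out = make_words_alt choices
instance (choices : List Int) (out : List (List Int)) : Decidable (Spec_make_words choices out) := by unfold Spec_make_words; infer_instance

-- ===== CLAIM (what is proved, stated in full; the proofs are below) =====
def Claim_equal_make_words : Prop := ∀ (choices : List Int), Dom_make_words choices → Spec_make_words choices (make_words choices)

-- ===== LEMMAS AND PROOFS =====

theorem stepB_single (choices : List Int) (p : List Int) :
    stepB choices [p] = (choices.filter (fun c => ¬ c ∈ p)).map (fun c => p ++ [c]) := by
  simp [stepB]

theorem stepB_decomp (choices : List Int) (L : List (List Int)) :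
    stepB choices L = L.flatMap (fun q => stepB choices [q]) := by
  simp [stepB]

theorem iter_flatMap (choices : List Int) (m : Nat) (L : List (List Int)) :
    Nat.iterate (stepB choices) m L = L.flatMap (fun q => Nat.iterate (stepB choices) m [q]) := by
  induction m generalizing L with
  | zero => simp
  | succ m ihm =>
    rw [Function.iterate_succ_apply, ihm (stepB choices L),
        stepB_decomp choices L, List.flatMap_assoc]
    congr 1
    funext q
    rw [← ihm (stepB choices [q]), Function.iterate_succ_apply]

theorem stepB_iter_single (choices : List Int) (n : Nat) (p : List Int) :
    Nat.iterate (stepB choices) (n + 1) [p]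
      = (choices.filter (fun c => ¬ c ∈ p)).flatMap
          (fun c => Nat.iterate (stepB choices) n [p ++ [c]]) := by
  rw [Function.iterate_succ_apply, stepB_single, iter_flatMap, List.flatMap_map]

theorem exploreA_eq_iter (choices : List Int) (n : Nat) (path : List Int)
    (h : path.length + n = choices.length) :
    exploreA choices n path = Nat.iterate (stepB choices) n [path] := by
  induction n generalizing path with
  | zero =>
    unfold exploreA
    simp at h
    simp [h]
  | succ n ih =>
    unfold exploreA
    have hne : path.length ≠ choices.length := by omega
    rw [if_neg hne]
    show choices.foldl
        (fun acc c => if c ∈ path then acc else acc ++ exploreA choices n (path ++ [c])) []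
      = _
    have hflip : (fun (acc : List (List Int)) c =>
        if c ∈ path then acc else acc ++ exploreA choices n (path ++ [c]))
      = (fun acc c => if ¬ c ∈ path then acc ++ exploreA choices n (path ++ [c]) else acc) := by
      funext acc c; rw [ite_not]
    rw [hflip, PySem.List.foldl_ite_eq_foldl_filter, PySem.List.foldl_append_eq_flatMap,
        List.nil_append, stepB_iter_single]
    congr 1
    funext c
    exact ih (path ++ [c]) (by simp; omega)

-- ===== VERDICT (by name: the statement is the Claim_ definition above) =====
theorem make_words_spec : Claim_equal_make_words := by
  intro choices _
  show make_words choices = make_words_alt choices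
  unfold make_words make_words_alt
  rw [exploreA_eq_iter choices choices.length [] (by simp)]
  induction choices.length with
  | zero => simp
  | succ n ih =>
    rw [List.range_succ, List.foldl_append, Function.iterate_succ_apply']
    simp [ih]
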